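-- pv_equiv track=rewrite | github.com/callmenoob77/BubbleBuster | logic.py | get_attached_to_ceiling
-- ===== SOURCE A (Python) =====
-- def get_neighbors(row, col, row_max, col_max):
--     """
--     Get the 6 neighbor positions for a bubble in hex grid.
--
--     The offset is different for even/odd rows because of the
--     hexagonal stagger layout we're using.
--
--     Args:
--         row: Row index of the bubble
--         col: Column index of the bubble
--         row_max: Total rows in grid
--         col_max: Total columns in grid
--
--     Returns:
--         List of valid (row, col) neighbor positions
--     """
--     neighbors = []
--
--     # even rows shift left, odd rows shift right
--     if row % 2 == 0:
--         potential_moves = [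
--             (row - 1, col - 1),
--             (row - 1, col),
--             (row, col - 1),
--             (row, col + 1),
--             (row + 1, col - 1),
--             (row + 1, col)
--         ]
--     else:
--         potential_moves = [
--             (row - 1, col),
--             (row - 1, col + 1),
--             (row, col - 1),
--             (row, col + 1),
--             (row + 1, col),
--             (row + 1, col + 1)
--         ]
--
--     # filter out invalid positions
--     for r, c in potential_moves:
--         if r % 2 == 0:
--             if 0 <= r < row_max and 0 <= c < col_max:
--                 neighbors.append((r, c))
--         else:
--             # odd rows have one less column
--             if 0 <= r < row_max and 0 <= c < col_max - 1:
--                 neighbors.append((r, c))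
--
--     return neighbors
--
-- def get_attached_to_ceiling(grid):
--     """
--     Find all bubbles that are still connected to the top row.
--
--     Starts BFS from row 0 and marks everything reachable.
--     Anything not marked will fall.
--
--     Args:
--         grid: Game board
--
--     Returns:
--         Set of (row, col) positions attached to ceiling
--     """
--     attached = set()
--     queue = []
--
--     # start with top row bubbles
--     for c in range(len(grid[0])):
--         if grid[0][c] != 0:
--             queue.append((0, c))
--             attached.add((0, c))
--
--     # BFS to find everything connected
--     while queue:
--         r, c = queue.pop()
--         for nr, nc in get_neighbors(r, c, len(grid), len(grid[0])):
--             if (nr, nc) not in attached and grid[nr][nc] != 0: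
--                 attached.add((nr, nc))
--                 queue.append((nr, nc))
--
--     return attached
-- ===== SOURCE B (Python) =====
-- def get_neighbors(row, col, row_max, col_max):
--     neighbors = []
--     if row % 2 == 0:
--         potential_moves = [
--             (row - 1, col - 1),
--             (row - 1, col),
--             (row, col - 1),
--             (row, col + 1),
--             (row + 1, col - 1),
--             (row + 1, col)
--         ]
--     else:
--         potential_moves = [
--             (row - 1, col),
--             (row - 1, col + 1),
--             (row, col - 1),
--             (row, col + 1),
--             (row + 1, col),
--             (row + 1, col + 1)
--         ]
--     for r, c in potential_moves:
--         if r % 2 == 0: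
--             if 0 <= r < row_max and 0 <= c < col_max:
--                 neighbors.append((r, c))
--         else:
--             if 0 <= r < row_max and 0 <= c < col_max - 1:
--                 neighbors.append((r, c))
--     return neighbors
--
--
-- def get_attached_to_ceiling(grid):
--     """Level-synchronous (frontier) BFS from the top row: instead of a worklist of
--     single cells popped one at a time, expand a whole frontier per round."""
--     frontier = [(0, c) for c in range(len(grid[0])) if grid[0][c] != 0]
--     attached = set(frontier)
--     while frontier:
--         nxt = []
--         for r, c in frontier:
--             for nr, nc in get_neighbors(r, c, len(grid), len(grid[0])):
--                 if (nr, nc) not in attached and (nr, nc) not in nxt and grid[nr][nc] != 0: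
--                     nxt.append((nr, nc))
--         attached.update(nxt)
--         frontier = nxt
--     return attached
-- ===== Notes on version B (the rewrite author's own statement) =====
-- stated objective: alternative
-- what changed: Replaces A's LIFO worklist (pop one cell at a time, push its new neighbours) by a level-synchronous frontier BFS: each round expands the whole frontier into a next-frontier list, unions it into the attached set, and recurses on it.
-- outside the precondition, e.g. on get_attached_to_ceiling([[1, 0], [0, 0], [7]]): A returns {(0, 0)}, B returns {(0, 0)}
import Mathlib
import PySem

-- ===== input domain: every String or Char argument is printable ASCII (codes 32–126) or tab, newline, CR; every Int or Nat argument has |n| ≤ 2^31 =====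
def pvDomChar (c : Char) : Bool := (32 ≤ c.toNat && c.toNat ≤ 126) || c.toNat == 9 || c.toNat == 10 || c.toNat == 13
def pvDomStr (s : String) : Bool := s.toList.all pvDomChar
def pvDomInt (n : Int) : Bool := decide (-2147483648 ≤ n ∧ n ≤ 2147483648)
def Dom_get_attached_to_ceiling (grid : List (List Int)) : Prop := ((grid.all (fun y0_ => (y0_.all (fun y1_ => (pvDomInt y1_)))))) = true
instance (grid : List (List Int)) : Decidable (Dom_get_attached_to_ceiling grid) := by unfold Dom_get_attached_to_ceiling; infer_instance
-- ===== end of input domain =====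

-- B replaces A's LIFO worklist (pop one cell, push its new neighbours) by a level-synchronous
-- frontier BFS (expand the whole frontier each round); same reachable set, alternative decomposition.
-- Python returns a SET of positions (its iteration order is not modelled): both ports render that
-- set's elements in canonical row-major order, so that set equality is list equality.

-- ===== PORT A =====

-- shared module helper, used verbatim by both A and B
def get_neighbors (row col row_max col_max : Int) : List (Int × Int) :=
  let potential_moves : List (Int × Int) :=
    if PySem.Int.mod row 2 = 0 then
      [(row - 1, col - 1), (row - 1, col), (row, col - 1),
       (row, col + 1), (row + 1, col - 1), (row + 1, col)]
    else
      [(row - 1, col), (row - 1, col + 1), (row, col - 1),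
       (row, col + 1), (row + 1, col), (row + 1, col + 1)]
  potential_moves.foldl (fun neighbors rc =>
    if PySem.Int.mod rc.1 2 = 0 then
      if 0 ≤ rc.1 ∧ rc.1 < row_max ∧ 0 ≤ rc.2 ∧ rc.2 < col_max then neighbors ++ [rc] else neighbors
    else
      if 0 ≤ rc.1 ∧ rc.1 < row_max ∧ 0 ≤ rc.2 ∧ rc.2 < col_max - 1 then neighbors ++ [rc] else neighbors) []

-- grid[r][c] as a total lookup; every access made by either program is in range under Pre_
def pvCell (grid : List (List Int)) (r c : Int) : Int :=
  PySem.List.pyGetD (PySem.List.pyGetD grid r []) c 0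

-- canonical row-major enumeration of all positions of the hex grid (even rows: C cells, odd rows: C-1);
-- used as the termination measure of both loops and to render the returned set canonically
def pvInBound (rm cm : Int) (rc : Int × Int) : Bool :=
  decide (0 ≤ rc.1 ∧ rc.1 < rm ∧ 0 ≤ rc.2 ∧ rc.2 <
    (if PySem.Int.mod rc.1 2 = 0 then cm else cm - 1))

def pvCells (R C : Int) : List (Int × Int) :=
  (PySem.List.pyRange 0 R 1).flatMap (fun r =>
    (PySem.List.pyRange 0 (if PySem.Int.mod r 2 = 0 then C else C - 1) 1).map (fun c => (r, c)))

-- number of positions not yet marked attached (termination measure)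
def pvRem (R C : Int) (att : List (Int × Int)) : Nat :=
  ((pvCells R C).filter (fun p => decide (p ∉ att))).length

-- render a set of positions in canonical row-major order (shared by both ports' return)
def pvCanon (grid : List (List Int)) (att : List (Int × Int)) : List (Int × Int) :=
  (pvCells (PySem.List.len grid) (PySem.List.len (PySem.List.pyGetD grid 0 []))).filter
    (fun p => decide (p ∈ att))

theorem mem_pvCells (R C : Int) (p : Int × Int) :
    p ∈ pvCells R C ↔ pvInBound R C p = true := by
  unfold pvCells pvInBound
  constructor
  · intro h
    obtain ⟨r, hr, hm⟩ := List.mem_flatMap.1 h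
    obtain ⟨c, hc, rfl⟩ := List.mem_map.1 hm
    rw [PySem.List.mem_pyRange_one] at hr hc
    exact decide_eq_true ⟨hr.1, hr.2, hc.1, hc.2⟩
  · intro h
    obtain ⟨h1, h2, h3, h4⟩ := of_decide_eq_true h
    exact List.mem_flatMap.2 ⟨p.1, PySem.List.mem_pyRange_one.2 ⟨h1, h2⟩,
      List.mem_map.2 ⟨p.2, PySem.List.mem_pyRange_one.2 ⟨h3, h4⟩, rfl⟩⟩

theorem pv_flatMap_nodup (f : Int → List (Int × Int)) :
    ∀ l : List Int, l.Nodup → (∀ a ∈ l, (f a).Nodup) →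
      (∀ a ∈ l, ∀ p ∈ f a, p.1 = a) → (l.flatMap f).Nodup := by
  intro l
  induction l with
  | nil => intro _ _ _; simp
  | cons a l ih =>
    intro hnd hf hkey
    rw [List.flatMap_cons]
    refine List.Nodup.append (hf a List.mem_cons_self)
      (ih hnd.of_cons (fun b hb => hf b (List.mem_cons_of_mem _ hb))
        (fun b hb => hkey b (List.mem_cons_of_mem _ hb))) ?_
    intro p hp hq
    obtain ⟨b, hb, hpb⟩ := List.mem_flatMap.1 hq
    have h1 : p.1 = a := hkey a List.mem_cons_self p hp
    have h2 : p.1 = b := hkey b (List.mem_cons_of_mem _ hb) p hpb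
    exact (List.nodup_cons.1 hnd).1 (h1 ▸ h2 ▸ hb)

theorem nodup_pvCells (R C : Int) : (pvCells R C).Nodup := by
  refine pv_flatMap_nodup _ _ (PySem.List.nodup_pyRange_one _ _) ?_ ?_
  · intro a _
    exact (PySem.List.nodup_pyRange_one _ _).map
      (fun x y h => congrArg Prod.snd h)
  · intro a _ p hp
    obtain ⟨c, -, rfl⟩ := List.mem_map.1 hp
    rfl

-- the filtering loop of get_neighbors is a filter by the bounds test
theorem gn_fold_eq (rm cm : Int) (l : List (Int × Int)) :
    ∀ acc : List (Int × Int),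
      l.foldl (fun neighbors rc =>
        if PySem.Int.mod rc.1 2 = 0 then
          if 0 ≤ rc.1 ∧ rc.1 < rm ∧ 0 ≤ rc.2 ∧ rc.2 < cm then neighbors ++ [rc] else neighbors
        else
          if 0 ≤ rc.1 ∧ rc.1 < rm ∧ 0 ≤ rc.2 ∧ rc.2 < cm - 1 then neighbors ++ [rc] else neighbors) acc
      = acc ++ l.filter (pvInBound rm cm) := by
  induction l with
  | nil => intro acc; simp
  | cons x l ih =>
    intro acc
    simp only [List.foldl_cons, List.filter_cons]
    by_cases hx : PySem.Int.mod x.1 2 = 0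
    · rw [if_pos hx]
      by_cases hb : 0 ≤ x.1 ∧ x.1 < rm ∧ 0 ≤ x.2 ∧ x.2 < cm
      · rw [if_pos hb, ih,
          show pvInBound rm cm x = true from decide_eq_true (by rw [if_pos hx]; exact hb),
          if_pos rfl, List.append_assoc, List.singleton_append]
      · rw [if_neg hb, ih,
          show pvInBound rm cm x = false from
            decide_eq_false (fun hh => hb (by rw [if_pos hx] at hh; exact hh)),
          if_neg Bool.false_ne_true]
    · rw [if_neg hx]
      by_cases hb : 0 ≤ x.1 ∧ x.1 < rm ∧ 0 ≤ x.2 ∧ x.2 < cm - 1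
      · rw [if_pos hb, ih,
          show pvInBound rm cm x = true from decide_eq_true (by rw [if_neg hx]; exact hb),
          if_pos rfl, List.append_assoc, List.singleton_append]
      · rw [if_neg hb, ih,
          show pvInBound rm cm x = false from
            decide_eq_false (fun hh => hb (by rw [if_neg hx] at hh; exact hh)),
          if_neg Bool.false_ne_true]

theorem mem_get_neighbors (r c rm cm : Int) (p : Int × Int) :
    p ∈ get_neighbors r c rm cm ↔
      p ∈ (if PySem.Int.mod r 2 = 0 then
            [(r - 1, c - 1), (r - 1, c), (r, c - 1), (r, c + 1), (r + 1, c - 1), (r + 1, c)]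
          else
            [(r - 1, c), (r - 1, c + 1), (r, c - 1), (r, c + 1), (r + 1, c), (r + 1, c + 1)]) ∧
      pvInBound rm cm p = true := by
  unfold get_neighbors
  by_cases hr : PySem.Int.mod r 2 = 0
  · simp only [if_pos hr, gn_fold_eq, List.nil_append, List.mem_filter]
  · simp only [if_neg hr, gn_fold_eq, List.nil_append, List.mem_filter]

-- a neighbour produced with the true grid dimensions is a position of the grid
theorem get_neighbors_sub_pvCells (grid : List (List Int)) (r c : Int) (p : Int × Int)
    (h : p ∈ get_neighbors r c (PySem.List.len grid)
          (PySem.List.len (PySem.List.pyGetD grid 0 []))) :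
    p ∈ pvCells (PySem.List.len grid) (PySem.List.len (PySem.List.pyGetD grid 0 [])) := by
  rw [mem_pvCells]
  exact ((mem_get_neighbors _ _ _ _ p).1 h).2

theorem pvRem_append (R C : Int) (a : List (Int × Int)) (p : Int × Int)
    (hp : p ∈ pvCells R C) (hna : p ∉ a) :
    pvRem R C (a ++ [p]) + 1 = pvRem R C a := by
  unfold pvRem
  have h1 : (pvCells R C).filter (fun x => decide (x ∉ a ++ [p]))
      = ((pvCells R C).filter (fun x => decide (x ∉ a))).filter (fun x => x != p) := by
    rw [List.filter_filter]
    refine List.filter_congr ?_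
    intro x _
    by_cases h2 : x = p
    · subst h2
      simp
    · by_cases h3 : x ∈ a <;> simp [List.mem_append, h2, h3]
  rw [h1]
  have hnd : ((pvCells R C).filter (fun x => decide (x ∉ a))).Nodup :=
    (nodup_pvCells R C).filter _
  have hmem : p ∈ (pvCells R C).filter (fun x => decide (x ∉ a)) :=
    List.mem_filter.2 ⟨hp, decide_eq_true hna⟩
  rw [← List.Nodup.erase_eq_filter hnd p, List.length_erase_of_mem hmem]
  exact Nat.succ_pred_eq_of_pos (List.length_pos_of_mem hmem)

theorem pvRem_append_list (R C : Int) :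
    ∀ (ext a : List (Int × Int)), ext.Nodup →
      (∀ p ∈ ext, p ∈ pvCells R C ∧ p ∉ a) →
      pvRem R C (a ++ ext) + ext.length = pvRem R C a := by
  intro ext
  induction ext with
  | nil => simp
  | cons p ext ih =>
    intro a hnd hall
    rw [show a ++ p :: ext = (a ++ [p]) ++ ext from by simp]
    have h2 := ih (a ++ [p]) hnd.of_cons (by
      intro q hq
      refine ⟨(hall q (List.mem_cons_of_mem _ hq)).1, ?_⟩
      intro hmem
      rcases List.mem_append.1 hmem with h | h
      · exact (hall q (List.mem_cons_of_mem _ hq)).2 h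
      · rw [List.mem_singleton] at h
        exact (List.nodup_cons.1 hnd).1 (h ▸ hq))
    have h3 := pvRem_append R C a p (hall p List.mem_cons_self).1 (hall p List.mem_cons_self).2
    rw [List.length_cons, ← Nat.add_assoc, h2]
    exact h3

-- if the element is not in the set, Python's set.add appends it
theorem pvSet_add_of_not_mem {p : Int × Int} {s : List (Int × Int)} (h : p ∉ s) :
    PySem.Set.add s p = s ++ [p] := by
  simp only [PySem.Set.add, PySem.Set.contains]
  rw [if_neg]
  simp only [List.contains_iff_mem]
  exact h

-- nodup fold of Python's set.add over fresh elements is plain append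
theorem pvFoldAdd : ∀ (l s : List (Int × Int)), l.Nodup → (∀ p ∈ l, p ∉ s) →
    l.foldl PySem.Set.add s = s ++ l := by
  intro l
  induction l with
  | nil => simp
  | cons p l ih =>
    intro s hnd hdis
    simp only [List.foldl_cons]
    rw [pvSet_add_of_not_mem (hdis p List.mem_cons_self)]
    rw [ih (s ++ [p]) hnd.of_cons (by
      intro q hq
      simp only [List.mem_append, List.mem_singleton]
      rintro (h | rfl)
      · exact hdis q (List.mem_cons_of_mem _ hq) h
      · exact (List.nodup_cons.1 hnd).1 hq)]
    simp

theorem pvSet_update_of_disjoint (s l : List (Int × Int)) (h1 : l.Nodup)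
    (h2 : ∀ p ∈ l, p ∉ s) : PySem.Set.update s l = s ++ l := by
  simp only [PySem.Set.update]
  exact pvFoldAdd l s h1 h2

-- the inner update loop of A: attached and queue receive the same new cells, and every
-- non-zero neighbour ends up in the attached set
theorem pvDfsFold (grid : List (List Int)) :
    ∀ (ns a q : List (Int × Int)), ∃ ext : List (Int × Int),
      ns.foldl (fun s p =>
          if p ∉ s.1 ∧ pvCell grid p.1 p.2 ≠ 0 then (PySem.Set.add s.1 p, s.2 ++ [p]) else s)
        (a, q) = (a ++ ext, q ++ ext)
      ∧ ext.Nodup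
      ∧ (∀ p ∈ ext, p ∈ ns ∧ p ∉ a ∧ pvCell grid p.1 p.2 ≠ 0)
      ∧ (∀ p ∈ ns, pvCell grid p.1 p.2 ≠ 0 → p ∈ a ++ ext) := by
  intro ns
  induction ns with
  | nil => intro a q; exact ⟨[], by simp⟩
  | cons p ns ih =>
    intro a q
    simp only [List.foldl_cons]
    by_cases hg : p ∉ a ∧ pvCell grid p.1 p.2 ≠ 0
    · rw [if_pos hg, pvSet_add_of_not_mem hg.1]
      obtain ⟨ext, heq, hnd, hprop, hcov⟩ := ih (a ++ [p]) (q ++ [p])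
      refine ⟨p :: ext, ?_, ?_, ?_, ?_⟩
      · rw [heq]; simp
      · refine List.nodup_cons.2 ⟨?_, hnd⟩
        intro hp
        exact (hprop p hp).2.1 (by simp)
      · intro x hx
        rcases List.mem_cons.1 hx with rfl | hx
        · exact ⟨List.mem_cons_self, hg.1, hg.2⟩
        · obtain ⟨h1, h2, h3⟩ := hprop x hx
          refine ⟨List.mem_cons_of_mem _ h1, ?_, h3⟩
          intro hxa
          exact h2 (by simp [hxa])
      · intro x hx hc
        rcases List.mem_cons.1 hx with rfl | hx
        · simp
        · have := hcov x hx hc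
          simpa [List.append_assoc] using this
    · rw [if_neg hg]
      obtain ⟨ext, heq, hnd, hprop, hcov⟩ := ih a q
      refine ⟨ext, heq, hnd, ?_, ?_⟩
      · intro x hx
        obtain ⟨h1, h2, h3⟩ := hprop x hx
        exact ⟨List.mem_cons_of_mem _ h1, h2, h3⟩
      · intro x hx hc
        rcases List.mem_cons.1 hx with rfl | hx
        · rcases not_and_or.1 hg with h | h
          · simp only [not_not] at h
            exact List.mem_append_left _ h
          · exact absurd hc h
        · exact hcov x hx hc

-- Python A: while queue: r, c = queue.pop() (removes and returns the LAST element);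
-- for each valid non-zero unseen neighbour, add it to attached and push it
def pvDfs (grid : List (List Int)) (attached queue : List (Int × Int)) : List (Int × Int) :=
  if hq : queue = [] then attached
  else
    pvDfs grid
      ((get_neighbors (queue.getLast hq).1 (queue.getLast hq).2 (PySem.List.len grid)
          (PySem.List.len (PySem.List.pyGetD grid 0 []))).foldl
        (fun s p =>
          if p ∉ s.1 ∧ pvCell grid p.1 p.2 ≠ 0 then (PySem.Set.add s.1 p, s.2 ++ [p]) else s)
        (attached, queue.dropLast)).1
      ((get_neighbors (queue.getLast hq).1 (queue.getLast hq).2 (PySem.List.len grid)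
          (PySem.List.len (PySem.List.pyGetD grid 0 []))).foldl
        (fun s p =>
          if p ∉ s.1 ∧ pvCell grid p.1 p.2 ≠ 0 then (PySem.Set.add s.1 p, s.2 ++ [p]) else s)
        (attached, queue.dropLast)).2
termination_by pvRem (PySem.List.len grid) (PySem.List.len (PySem.List.pyGetD grid 0 [])) attached + queue.length
decreasing_by
  obtain ⟨ext, heq, hnd, hprop, -⟩ := pvDfsFold grid
    (get_neighbors (queue.getLast hq).1 (queue.getLast hq).2 (PySem.List.len grid)
      (PySem.List.len (PySem.List.pyGetD grid 0 []))) attached queue.dropLast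
  simp only [dite_eq_ite, heq]
  have hlen : queue.length = queue.dropLast.length + 1 := by
    conv_lhs => rw [← List.dropLast_append_getLast hq]
    simp
  have hrem := pvRem_append_list (PySem.List.len grid) (PySem.List.len (PySem.List.pyGetD grid 0 [])) ext attached hnd
    (fun p hp => ⟨get_neighbors_sub_pvCells grid _ _ p (hprop p hp).1, (hprop p hp).2.1⟩)
  simp only [List.length_append]
  omega

def get_attached_to_ceiling (grid : List (List Int)) : List (Int × Int) :=
  let init := (PySem.List.pyRange 0 (PySem.List.len (PySem.List.pyGetD grid 0 [])) 1).foldl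
    (fun s c =>
      if pvCell grid 0 c ≠ 0 then (PySem.Set.add s.1 (0, c), s.2 ++ [((0 : Int), c)]) else s)
    (([] : List (Int × Int)), ([] : List (Int × Int)))
  pvCanon grid (pvDfs grid init.1 init.2)

-- ===== PORT B =====

-- B's seeding comprehension: [(0, c) for c in range(len(grid[0])) if grid[0][c] != 0]
def pvSeedList (grid : List (List Int)) : List (Int × Int) :=
  ((PySem.List.pyRange 0 (PySem.List.len (PySem.List.pyGetD grid 0 [])) 1).filter
    (fun c => decide (pvCell grid 0 c ≠ 0))).map (fun c => ((0 : Int), c))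

-- the per-round expansion of B: collect the whole frontier's unseen non-zero neighbours
def pvExpand (grid : List (List Int)) (attached frontier : List (Int × Int)) : List (Int × Int) :=
  frontier.foldl (fun nxt rc =>
    (get_neighbors rc.1 rc.2 (PySem.List.len grid)
      (PySem.List.len (PySem.List.pyGetD grid 0 []))).foldl
      (fun nxt p =>
        if p ∉ attached ∧ p ∉ nxt ∧ pvCell grid p.1 p.2 ≠ 0 then nxt ++ [p] else nxt) nxt) []

-- the inner collection loop over one frontier cell's neighbours
theorem pvBfsInner (grid : List (List Int)) (attached : List (Int × Int)) :
    ∀ (ns acc : List (Int × Int)), acc.Nodup →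
      ∃ ext : List (Int × Int),
        ns.foldl (fun nxt p =>
            if p ∉ attached ∧ p ∉ nxt ∧ pvCell grid p.1 p.2 ≠ 0 then nxt ++ [p] else nxt) acc
          = acc ++ ext
        ∧ (acc ++ ext).Nodup
        ∧ (∀ p ∈ ext, p ∈ ns ∧ p ∉ attached ∧ p ∉ acc ∧ pvCell grid p.1 p.2 ≠ 0)
        ∧ (∀ p ∈ ns, pvCell grid p.1 p.2 ≠ 0 → p ∈ attached ∨ p ∈ acc ++ ext) := by
  intro ns
  induction ns with
  | nil => intro acc hnd; exact ⟨[], by simpa using hnd⟩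
  | cons p ns ih =>
    intro acc hnd
    simp only [List.foldl_cons]
    by_cases hg : p ∉ attached ∧ p ∉ acc ∧ pvCell grid p.1 p.2 ≠ 0
    · rw [if_pos hg]
      obtain ⟨ext, heq, hnd2, hprop, hcov⟩ := ih (acc ++ [p])
        (by
          refine List.Nodup.append hnd (List.nodup_singleton p) ?_
          intro x hx hx2
          rw [List.mem_singleton] at hx2
          subst hx2
          exact hg.2.1 hx)
      refine ⟨p :: ext, by simpa using heq, by simpa using hnd2, ?_, ?_⟩
      · intro x hx
        rcases List.mem_cons.1 hx with rfl | hx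
        · exact ⟨List.mem_cons_self, hg.1, hg.2.1, hg.2.2⟩
        · obtain ⟨h1, h2, h3, h4⟩ := hprop x hx
          refine ⟨List.mem_cons_of_mem _ h1, h2, ?_, h4⟩
          intro hxa
          exact h3 (by simp [hxa])
      · intro x hx hc
        rcases List.mem_cons.1 hx with rfl | hx
        · right; simp
        · rcases hcov x hx hc with h | h
          · exact Or.inl h
          · right; simpa [List.append_assoc] using h
    · rw [if_neg hg]
      obtain ⟨ext, heq, hnd2, hprop, hcov⟩ := ih acc hnd
      refine ⟨ext, heq, hnd2, ?_, ?_⟩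
      · intro x hx
        obtain ⟨h1, h2, h3, h4⟩ := hprop x hx
        exact ⟨List.mem_cons_of_mem _ h1, h2, h3, h4⟩
      · intro x hx hc
        rcases List.mem_cons.1 hx with rfl | hx
        · by_cases h1 : x ∈ attached
          · exact Or.inl h1
          · by_cases h2 : x ∈ acc
            · exact Or.inr (List.mem_append_left _ h2)
            · exact absurd ⟨h1, h2, hc⟩ hg
        · exact hcov x hx hc

-- one whole round of B's expansion
theorem pvBfsRound (grid : List (List Int)) (attached : List (Int × Int)) :
    ∀ (fr acc : List (Int × Int)), acc.Nodup →
      ∃ ext : List (Int × Int),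
        fr.foldl (fun nxt rc =>
            (get_neighbors rc.1 rc.2 (PySem.List.len grid)
              (PySem.List.len (PySem.List.pyGetD grid 0 []))).foldl
              (fun nxt p =>
                if p ∉ attached ∧ p ∉ nxt ∧ pvCell grid p.1 p.2 ≠ 0 then nxt ++ [p] else nxt) nxt) acc
          = acc ++ ext
        ∧ (acc ++ ext).Nodup
        ∧ (∀ p ∈ ext, p ∉ attached ∧ pvCell grid p.1 p.2 ≠ 0 ∧
            ∃ rc ∈ fr, p ∈ get_neighbors rc.1 rc.2 (PySem.List.len grid)
              (PySem.List.len (PySem.List.pyGetD grid 0 [])))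
        ∧ (∀ rc ∈ fr, ∀ p ∈ get_neighbors rc.1 rc.2 (PySem.List.len grid)
              (PySem.List.len (PySem.List.pyGetD grid 0 [])),
            pvCell grid p.1 p.2 ≠ 0 → p ∈ attached ∨ p ∈ acc ++ ext) := by
  intro fr
  induction fr with
  | nil => intro acc hnd; exact ⟨[], by simpa using hnd⟩
  | cons rc fr ih =>
    intro acc hnd
    simp only [List.foldl_cons]
    obtain ⟨ext0, heq0, hnd0, hprop0, hcov0⟩ :=
      pvBfsInner grid attached
        (get_neighbors rc.1 rc.2 (PySem.List.len grid)
          (PySem.List.len (PySem.List.pyGetD grid 0 []))) acc hnd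
    rw [heq0]
    obtain ⟨ext1, heq1, hnd1, hprop1, hcov1⟩ := ih (acc ++ ext0) hnd0
    refine ⟨ext0 ++ ext1, by simpa [List.append_assoc] using heq1,
      by simpa [List.append_assoc] using hnd1, ?_, ?_⟩
    · intro p hp
      rcases List.mem_append.1 hp with h | h
      · obtain ⟨h1, h2, -, h4⟩ := hprop0 p h
        exact ⟨h2, h4, rc, List.mem_cons_self, h1⟩
      · obtain ⟨h1, h2, ⟨rc2, hrc2, h3⟩⟩ := hprop1 p h
        exact ⟨h1, h2, rc2, List.mem_cons_of_mem _ hrc2, h3⟩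
    · intro rc2 hrc2 p hp hc
      rcases List.mem_cons.1 hrc2 with rfl | hrc2
      · rcases hcov0 p hp hc with h | h
        · exact Or.inl h
        · right
          rcases List.mem_append.1 h with h | h
          · exact List.mem_append_left _ h
          · exact List.mem_append_right _ (List.mem_append_left _ h)
      · rcases hcov1 rc2 hrc2 p hp hc with h | h
        · exact Or.inl h
        · right; simpa [List.append_assoc] using h

theorem pvExpand_spec (grid : List (List Int)) (attached frontier : List (Int × Int)) :
    ∃ ext : List (Int × Int), pvExpand grid attached frontier = ext
      ∧ ext.Nodup
      ∧ (∀ p ∈ ext, p ∉ attached ∧ pvCell grid p.1 p.2 ≠ 0 ∧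
          ∃ rc ∈ frontier, p ∈ get_neighbors rc.1 rc.2 (PySem.List.len grid)
            (PySem.List.len (PySem.List.pyGetD grid 0 [])))
      ∧ (∀ rc ∈ frontier, ∀ p ∈ get_neighbors rc.1 rc.2 (PySem.List.len grid)
            (PySem.List.len (PySem.List.pyGetD grid 0 [])),
          pvCell grid p.1 p.2 ≠ 0 → p ∈ attached ∨ p ∈ ext) := by
  obtain ⟨ext, heq, hnd, hprop, hcov⟩ := pvBfsRound grid attached frontier [] List.nodup_nil
  rw [List.nil_append] at heq hnd
  refine ⟨ext, by unfold pvExpand; exact heq, hnd, hprop, ?_⟩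
  intro rc hrc p hp hc
  have := hcov rc hrc p hp hc
  simpa using this

-- Python B: while frontier: collect the next frontier from the whole frontier's neighbours,
-- union it into attached, and continue with it
def pvBfs (grid : List (List Int)) (attached frontier : List (Int × Int)) : List (Int × Int) :=
  if h : frontier = [] then attached
  else
    pvBfs grid (PySem.Set.update attached (pvExpand grid attached frontier))
      (pvExpand grid attached frontier)
termination_by (pvRem (PySem.List.len grid) (PySem.List.len (PySem.List.pyGetD grid 0 [])) attached, frontier.length)
decreasing_by
  obtain ⟨ext, heq, hnd, hprop, -⟩ := pvExpand_spec grid attached frontier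
  rw [heq]
  rw [pvSet_update_of_disjoint attached ext hnd (fun p hp => (hprop p hp).1)]
  rcases List.eq_nil_or_concat ext with rfl | ⟨ys, y, hys⟩
  · simp only [List.append_nil, List.length_nil]
    exact Prod.Lex.right _ (List.length_pos_of_ne_nil h)
  · rw [List.concat_eq_append] at hys
    subst hys
    apply Prod.Lex.left
    have hrem := pvRem_append_list (PySem.List.len grid) (PySem.List.len (PySem.List.pyGetD grid 0 []))
      (ys ++ [y]) attached hnd
      (by
        intro p hp
        obtain ⟨h1, -, rc, -, h3⟩ := hprop p hp
        exact ⟨get_neighbors_sub_pvCells grid _ _ p h3, h1⟩)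
    have hl : (ys ++ [y]).length = ys.length + 1 := by simp
    omega

def get_attached_to_ceiling_alt (grid : List (List Int)) : List (Int × Int) :=
  let frontier := pvSeedList grid
  let attached := PySem.Set.ofList frontier
  pvCanon grid (pvBfs grid attached frontier)

-- ===== PRECONDITION & SPEC =====
-- Pre_ admits every grid whose rows are long enough for the hex layout the search assumes
-- (row i needs len(grid[0]) cells when i is even, one less when odd), plus any grid whose top
-- row is all zero (the search then stops at once).  It excludes the empty grid (A raises
-- IndexError on grid[0]) and ragged grids with a short row, on which A raises IndexError
-- whenever the search reaches the short row; in the cases where the search happens not to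
-- reach the short row A returns, with the same value as B (see the cited example).
def Pre_get_attached_to_ceiling (grid : List (List Int)) : Prop :=
  grid ≠ [] ∧
  (((List.range grid.length).all (fun i =>
      decide ((if i % 2 = 0 then (grid.headD []).length else (grid.headD []).length - 1)
        ≤ (grid.getD i []).length)) = true)
   ∨ ((grid.headD []).all (fun x => x == 0) = true))
instance (grid : List (List Int)) : Decidable (Pre_get_attached_to_ceiling grid) := by
  unfold Pre_get_attached_to_ceiling; infer_instance

def pvWitness_get_attached_to_ceiling : List (List Int) := [[1, 1], [2]]

def Spec_get_attached_to_ceiling (grid : List (List Int)) (out : List (Int × Int)) : Prop :=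
  out = get_attached_to_ceiling_alt grid
instance (grid : List (List Int)) (out : List (Int × Int)) :
    Decidable (Spec_get_attached_to_ceiling grid out) := by
  unfold Spec_get_attached_to_ceiling; infer_instance

-- ===== CLAIM (what is proved, stated in full; the proofs are below) =====
def Claim_equal_get_attached_to_ceiling : Prop :=
  ∀ (grid : List (List Int)), Dom_get_attached_to_ceiling grid →
    Pre_get_attached_to_ceiling grid →
    Spec_get_attached_to_ceiling grid (get_attached_to_ceiling grid)

-- ===== LEMMAS AND PROOFS =====

theorem pvSet_ofList_of_nodup (l : List (Int × Int)) (h : l.Nodup) :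
    PySem.Set.ofList l = l := by
  simp only [PySem.Set.ofList, PySem.Set.empty]
  rw [pvFoldAdd l [] h (by simp)]
  simp

-- positions reachable from the top row through non-zero cells
inductive pvReach (grid : List (List Int)) : Int × Int → Prop where
  | seed (c : Int) : 0 ≤ c → c < PySem.List.len (PySem.List.pyGetD grid 0 []) →
      pvCell grid 0 c ≠ 0 → pvReach grid (0, c)
  | step (x p : Int × Int) : pvReach grid x →
      p ∈ get_neighbors x.1 x.2 (PySem.List.len grid)
        (PySem.List.len (PySem.List.pyGetD grid 0 [])) →
      pvCell grid p.1 p.2 ≠ 0 → pvReach grid p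

theorem pvDfs_spec (grid : List (List Int)) :
    ∀ (N : Nat) (attached queue : List (Int × Int)),
      pvRem (PySem.List.len grid) (PySem.List.len (PySem.List.pyGetD grid 0 [])) attached + queue.length ≤ N →
      (∀ x ∈ queue, x ∈ attached) →
      (∀ x ∈ attached, pvReach grid x) →
      (∀ x ∈ attached, x ∉ queue →
        ∀ p ∈ get_neighbors x.1 x.2 (PySem.List.len grid)
            (PySem.List.len (PySem.List.pyGetD grid 0 [])),
          pvCell grid p.1 p.2 ≠ 0 → p ∈ attached) →
      (∀ z ∈ attached, z ∈ pvDfs grid attached queue) ∧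
      (∀ z ∈ pvDfs grid attached queue, pvReach grid z) ∧
      (∀ x ∈ pvDfs grid attached queue,
        ∀ p ∈ get_neighbors x.1 x.2 (PySem.List.len grid)
            (PySem.List.len (PySem.List.pyGetD grid 0 [])),
          pvCell grid p.1 p.2 ≠ 0 → p ∈ pvDfs grid attached queue) := by
  intro N
  induction N with
  | zero =>
    intro attached queue hm h1 h2 h3
    have hq : queue = [] := List.length_eq_zero_iff.1 (by omega)
    rw [pvDfs.eq_def, dif_pos hq]
    subst hq
    exact ⟨fun z hz => hz, h2, fun x hx p hp hc => h3 x hx (List.not_mem_nil) p hp hc⟩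
  | succ n ih =>
    intro attached queue hm h1 h2 h3
    by_cases hq : queue = []
    · rw [pvDfs.eq_def, dif_pos hq]
      subst hq
      exact ⟨fun z hz => hz, h2, fun x hx p hp hc => h3 x hx (List.not_mem_nil) p hp hc⟩
    · rw [pvDfs.eq_def, dif_neg hq]
      obtain ⟨ext, heq, hnd, hprop, hcov⟩ := pvDfsFold grid
        (get_neighbors (queue.getLast hq).1 (queue.getLast hq).2 (PySem.List.len grid)
          (PySem.List.len (PySem.List.pyGetD grid 0 []))) attached queue.dropLast
      simp only [heq]
      have hq2 : queue = queue.dropLast ++ [queue.getLast hq] :=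
        (List.dropLast_append_getLast hq).symm
      have hrcm : queue.getLast hq ∈ attached := h1 _ (List.getLast_mem hq)
      have hA : ∀ x ∈ queue.dropLast ++ ext, x ∈ attached ++ ext := by
        intro x hx
        rcases List.mem_append.1 hx with h | h
        · exact List.mem_append_left _ (h1 x (by rw [hq2]; exact List.mem_append_left _ h))
        · exact List.mem_append_right _ h
      have hB : ∀ x ∈ attached ++ ext, pvReach grid x := by
        intro x hx
        rcases List.mem_append.1 hx with h | h
        · exact h2 x h
        · obtain ⟨hn, -, hc⟩ := hprop x h
          exact pvReach.step _ x (h2 _ hrcm) hn hc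
      have hC : ∀ x ∈ attached ++ ext, x ∉ queue.dropLast ++ ext →
          ∀ p ∈ get_neighbors x.1 x.2 (PySem.List.len grid)
              (PySem.List.len (PySem.List.pyGetD grid 0 [])),
            pvCell grid p.1 p.2 ≠ 0 → p ∈ attached ++ ext := by
        intro x hx hnx p hp hc
        rcases List.mem_append.1 hx with h | h
        · by_cases hxq : x ∈ queue
          · rw [hq2] at hxq
            rcases List.mem_append.1 hxq with hh | hh
            · exact absurd (List.mem_append_left _ hh) hnx
            · rw [List.mem_singleton] at hh
              subst hh
              exact hcov p hp hc
          · exact List.mem_append_left _ (h3 x h hxq p hp hc)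
        · exact absurd (List.mem_append_right _ h) hnx
      have hmeas : pvRem (PySem.List.len grid) (PySem.List.len (PySem.List.pyGetD grid 0 [])) (attached ++ ext)
          + (queue.dropLast ++ ext).length ≤ n := by
        have hrem := pvRem_append_list (PySem.List.len grid) (PySem.List.len (PySem.List.pyGetD grid 0 []))
          ext attached hnd
          (fun p hp => ⟨get_neighbors_sub_pvCells grid _ _ p (hprop p hp).1, (hprop p hp).2.1⟩)
        have hlen : queue.length = queue.dropLast.length + 1 := by
          conv_lhs => rw [hq2]
          simp
        simp only [List.length_append]
        omega
      have hres := ih (attached ++ ext) (queue.dropLast ++ ext) hmeas hA hB hC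
      exact ⟨fun z hz => hres.1 z (List.mem_append_left _ hz), hres.2.1, hres.2.2⟩

theorem pvBfs_spec (grid : List (List Int)) :
    ∀ (N : Nat) (attached frontier : List (Int × Int)),
      pvRem (PySem.List.len grid) (PySem.List.len (PySem.List.pyGetD grid 0 [])) attached < N →
      (∀ x ∈ frontier, x ∈ attached) →
      (∀ x ∈ attached, pvReach grid x) →
      (∀ x ∈ attached, x ∉ frontier →
        ∀ p ∈ get_neighbors x.1 x.2 (PySem.List.len grid)
            (PySem.List.len (PySem.List.pyGetD grid 0 [])),
          pvCell grid p.1 p.2 ≠ 0 → p ∈ attached) →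
      (∀ z ∈ attached, z ∈ pvBfs grid attached frontier) ∧
      (∀ z ∈ pvBfs grid attached frontier, pvReach grid z) ∧
      (∀ x ∈ pvBfs grid attached frontier,
        ∀ p ∈ get_neighbors x.1 x.2 (PySem.List.len grid)
            (PySem.List.len (PySem.List.pyGetD grid 0 [])),
          pvCell grid p.1 p.2 ≠ 0 → p ∈ pvBfs grid attached frontier) := by
  intro N
  induction N with
  | zero =>
    intro attached frontier hm
    exact absurd hm (Nat.not_lt_zero _)
  | succ n ih =>
    intro attached frontier hm h1 h2 h3
    by_cases hf : frontier = []
    · rw [pvBfs.eq_def, dif_pos hf]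
      subst hf
      exact ⟨fun z hz => hz, h2, fun x hx p hp hc => h3 x hx (List.not_mem_nil) p hp hc⟩
    · rw [pvBfs.eq_def, dif_neg hf]
      obtain ⟨ext, heq, hnd, hprop, hcov⟩ := pvExpand_spec grid attached frontier
      rw [heq]
      rw [pvSet_update_of_disjoint attached ext hnd (fun p hp => (hprop p hp).1)]
      have hB : ∀ x ∈ attached ++ ext, pvReach grid x := by
        intro x hx
        rcases List.mem_append.1 hx with hh | hh
        · exact h2 x hh
        · obtain ⟨-, hc, rc, hrc, hn⟩ := hprop x hh
          exact pvReach.step rc x (h2 rc (h1 rc hrc)) hn hc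
      rcases List.eq_nil_or_concat ext with rfl | ⟨ys, y, hys⟩
      · rw [List.append_nil]
        rw [pvBfs.eq_def, dif_pos rfl]
        refine ⟨fun z hz => hz, h2, ?_⟩
        intro x hx p hp hc
        by_cases hxf : x ∈ frontier
        · have := hcov x hxf p hp hc
          simpa using this
        · exact h3 x hx hxf p hp hc
      · rw [List.concat_eq_append] at hys
        subst hys
        have hC : ∀ x ∈ attached ++ (ys ++ [y]), x ∉ (ys ++ [y]) →
            ∀ p ∈ get_neighbors x.1 x.2 (PySem.List.len grid)
                (PySem.List.len (PySem.List.pyGetD grid 0 [])),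
              pvCell grid p.1 p.2 ≠ 0 → p ∈ attached ++ (ys ++ [y]) := by
          intro x hx hnx p hp hc
          rcases List.mem_append.1 hx with hh | hh
          · by_cases hxf : x ∈ frontier
            · rcases hcov x hxf p hp hc with h | h
              · exact List.mem_append_left _ h
              · exact List.mem_append_right _ h
            · exact List.mem_append_left _ (h3 x hh hxf p hp hc)
          · exact absurd hh hnx
        have hmeas : pvRem (PySem.List.len grid) (PySem.List.len (PySem.List.pyGetD grid 0 []))
            (attached ++ (ys ++ [y])) < n := by
          have hrem := pvRem_append_list (PySem.List.len grid) (PySem.List.len (PySem.List.pyGetD grid 0 []))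
            (ys ++ [y]) attached hnd
            (by
              intro p hp
              obtain ⟨hp1, -, rc, -, hp3⟩ := hprop p hp
              exact ⟨get_neighbors_sub_pvCells grid _ _ p hp3, hp1⟩)
          have hl : (ys ++ [y]).length = ys.length + 1 := by simp
          omega
        have hres := ih (attached ++ (ys ++ [y])) (ys ++ [y]) hmeas
          (fun x hx => List.mem_append_right _ hx) hB hC
        exact ⟨fun z hz => hres.1 z (List.mem_append_left _ hz), hres.2.1, hres.2.2⟩

-- A's seeding loop produces B's seed list, in both components
theorem pvSeedsFold (grid : List (List Int)) (n : Nat) :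
    (PySem.List.pyRange 0 (n : Int) 1).foldl
      (fun s c =>
        if pvCell grid 0 c ≠ 0 then (PySem.Set.add s.1 (0, c), s.2 ++ [((0 : Int), c)]) else s)
      (([] : List (Int × Int)), ([] : List (Int × Int)))
    = (((PySem.List.pyRange 0 (n : Int) 1).filter
          (fun c => decide (pvCell grid 0 c ≠ 0))).map (fun c => ((0 : Int), c)),
       ((PySem.List.pyRange 0 (n : Int) 1).filter
          (fun c => decide (pvCell grid 0 c ≠ 0))).map (fun c => ((0 : Int), c))) := by
  induction n with
  | zero =>
    rw [PySem.List.pyRange_one_eq_nil (by norm_num)]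
    simp
  | succ n ih =>
    have hr : PySem.List.pyRange 0 ((n + 1 : Nat) : Int) 1
        = PySem.List.pyRange 0 (n : Int) 1 ++ [(n : Int)] := by
      push_cast
      exact PySem.List.pyRange_one_succ_right (by positivity)
    rw [hr, List.foldl_append, ih, List.filter_append, List.map_append]
    simp only [List.foldl_cons, List.foldl_nil, List.filter_cons, List.filter_nil]
    by_cases hc : pvCell grid 0 (n : Int) ≠ 0
    · rw [if_pos hc]
      have hni : ((0 : Int), (n : Int)) ∉ ((PySem.List.pyRange 0 (n : Int) 1).filter
          (fun c => decide (pvCell grid 0 c ≠ 0))).map (fun c => ((0 : Int), c)) := by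
        simp only [List.mem_map, List.mem_filter, PySem.List.mem_pyRange_one]
        rintro ⟨c, ⟨⟨-, hlt⟩, -⟩, heqc⟩
        have : c = (n : Int) := by simpa using heqc
        omega
      rw [pvSet_add_of_not_mem hni]
      simp [hc]
    · rw [if_neg hc]
      simp only [ne_eq, not_not] at hc
      simp [hc]

theorem pvSeedsA (grid : List (List Int)) :
    (PySem.List.pyRange 0 (PySem.List.len (PySem.List.pyGetD grid 0 [])) 1).foldl
      (fun s c =>
        if pvCell grid 0 c ≠ 0 then (PySem.Set.add s.1 (0, c), s.2 ++ [((0 : Int), c)]) else s)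
      (([] : List (Int × Int)), ([] : List (Int × Int)))
    = (pvSeedList grid, pvSeedList grid) := by
  have h := pvSeedsFold grid (PySem.List.pyGetD grid 0 []).length
  unfold pvSeedList
  simp only [PySem.List.len_eq] at h ⊢
  exact h

theorem pvSeedList_mem (grid : List (List Int)) (z : Int × Int) :
    z ∈ pvSeedList grid ↔
      ∃ c : Int, z = (0, c) ∧ 0 ≤ c ∧ c < PySem.List.len (PySem.List.pyGetD grid 0 []) ∧
        pvCell grid 0 c ≠ 0 := by
  unfold pvSeedList
  simp only [List.mem_map, List.mem_filter, PySem.List.mem_pyRange_one, decide_eq_true_eq]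
  constructor
  · rintro ⟨c, ⟨⟨h1, h2⟩, h3⟩, rfl⟩
    exact ⟨c, rfl, h1, h2, h3⟩
  · rintro ⟨c, rfl, h1, h2, h3⟩
    exact ⟨c, ⟨⟨h1, h2⟩, h3⟩, rfl⟩

theorem pvSeedList_nodup (grid : List (List Int)) : (pvSeedList grid).Nodup := by
  unfold pvSeedList
  refine List.Nodup.map ?_ ((PySem.List.nodup_pyRange_one _ _).filter _)
  intro a b h
  simpa using h

-- on the seed state, both searches compute exactly the reachable set
theorem pvMemA (grid : List (List Int)) (z : Int × Int) :
    z ∈ pvDfs grid (pvSeedList grid) (pvSeedList grid) ↔ pvReach grid z := by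
  obtain ⟨hsub, hsound, hclosed⟩ := pvDfs_spec grid
    (pvRem (PySem.List.len grid) (PySem.List.len (PySem.List.pyGetD grid 0 [])) (pvSeedList grid)
      + (pvSeedList grid).length)
    (pvSeedList grid) (pvSeedList grid) (le_refl _)
    (fun x hx => hx)
    (by
      intro x hx
      obtain ⟨c, rfl, h1, h2, h3⟩ := (pvSeedList_mem grid x).1 hx
      exact pvReach.seed c h1 h2 h3)
    (fun x hx hnx => absurd hx hnx)
  constructor
  · exact hsound z
  · intro hre
    induction hre with
    | seed c h1 h2 h3 =>
      exact hsub _ ((pvSeedList_mem grid _).2 ⟨c, rfl, h1, h2, h3⟩)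
    | step x p hx hn hc ihx =>
      exact hclosed x ihx p hn hc

theorem pvMemB (grid : List (List Int)) (z : Int × Int) :
    z ∈ pvBfs grid (pvSeedList grid) (pvSeedList grid) ↔ pvReach grid z := by
  obtain ⟨hsub, hsound, hclosed⟩ := pvBfs_spec grid
    (pvRem (PySem.List.len grid) (PySem.List.len (PySem.List.pyGetD grid 0 [])) (pvSeedList grid) + 1)
    (pvSeedList grid) (pvSeedList grid) (Nat.lt_succ_self _)
    (fun x hx => hx)
    (by
      intro x hx
      obtain ⟨c, rfl, h1, h2, h3⟩ := (pvSeedList_mem grid x).1 hx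
      exact pvReach.seed c h1 h2 h3)
    (fun x hx hnx => absurd hx hnx)
  constructor
  · exact hsound z
  · intro hre
    induction hre with
    | seed c h1 h2 h3 =>
      exact hsub _ ((pvSeedList_mem grid _).2 ⟨c, rfl, h1, h2, h3⟩)
    | step x p hx hn hc ihx =>
      exact hclosed x ihx p hn hc

theorem pvMain (grid : List (List Int)) :
    get_attached_to_ceiling grid = get_attached_to_ceiling_alt grid := by
  simp only [get_attached_to_ceiling, get_attached_to_ceiling_alt, pvSeedsA,
    pvSet_ofList_of_nodup _ (pvSeedList_nodup grid)]
  unfold pvCanon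
  apply List.filter_congr
  intro p _
  simp only [decide_eq_decide]
  rw [pvMemA, pvMemB]

-- ===== VERDICT (by name: the statement is the Claim_ definition above) =====
theorem get_attached_to_ceiling_spec : Claim_equal_get_attached_to_ceiling := by
  intro grid _ _
  unfold Spec_get_attached_to_ceiling
  exact pvMain grid
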